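-- pv_equiv track=rewrite | github.com/De777uRe/LeetCodePython | UniqueMorseCodeWords.py | uniqueMorseRepresentations
-- ===== SOURCE A (Python) =====
-- def uniqueMorseRepresentations(words):
--     """
--     :type words: List[str]
--     :rtype: int
--     """
--     morse_alphabet = [".-", "-...", "-.-.", "-..", ".", "..-.", "--.", "....", "..", ".---", "-.-", ".-..", "--",
--                       "-.",
--                       "---", ".--.", "--.-", ".-.", "...", "-", "..-", "...-", ".--", "-..-", "-.--", "--.."]
--     transformations = set()
--
--     for word in words:
--         morse_string = ""
--         for character in word:
--             morse_string += morse_alphabet[ord(character) - 97]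
--         transformations.add(morse_string)
--
--     return len(transformations)
-- ===== SOURCE B (Python) =====
-- def uniqueMorseRepresentations(words):
--     morse_alphabet = [".-", "-...", "-.-.", "-..", ".", "..-.", "--.", "....", "..", ".---", "-.-", ".-..", "--",
--                       "-.",
--                       "---", ".--.", "--.-", ".-.", "...", "-", "..-", "...-", ".--", "-..-", "-.--", "--.."]
--     transforms = sorted("".join(morse_alphabet[ord(c) - 97] for c in word) for word in words)
--     count = 0
--     prev = None
--     for t in transforms:
--         if t != prev:
--             count += 1
--             prev = t
--     return count
-- ===== Notes on version B (the rewrite author's own statement) =====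
-- stated objective: alternative
-- what changed: Replaces the hash-set deduplication with collecting all morse transformations into a list, sorting it, and counting elements that differ from their predecessor in one scan.
import Mathlib
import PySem

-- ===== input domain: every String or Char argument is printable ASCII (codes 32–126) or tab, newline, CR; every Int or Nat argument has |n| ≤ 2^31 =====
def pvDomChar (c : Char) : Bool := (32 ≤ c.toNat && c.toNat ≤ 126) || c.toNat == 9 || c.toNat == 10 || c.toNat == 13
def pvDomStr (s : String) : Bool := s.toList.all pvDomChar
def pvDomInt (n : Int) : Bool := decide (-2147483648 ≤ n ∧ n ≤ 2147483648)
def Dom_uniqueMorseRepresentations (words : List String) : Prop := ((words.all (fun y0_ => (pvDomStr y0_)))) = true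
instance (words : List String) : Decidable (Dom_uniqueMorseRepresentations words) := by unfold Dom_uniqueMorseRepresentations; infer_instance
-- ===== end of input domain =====

-- B replaces A's hash-set deduplication by sort-then-scan: collect every word's
-- morse transformation in a list, sort it, and count elements differing from their
-- predecessor (objective: alternative algorithm, similar cost).


def morseTable : List String :=
  [".-", "-...", "-.-.", "-..", ".", "..-.", "--.", "....", "..", ".---", "-.-", ".-..", "--",
   "-.",
   "---", ".--.", "--.-", ".-.", "...", "-", "..-", "...-", ".--", "-..-", "-.--", "--.."]

-- ===== PORT A =====
-- inner loop: morse_string += morse_alphabet[ord(character) - 97]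
-- (pyGet? is exact Python indexing incl. negative wraparound; its `none` case (IndexError)
-- is excluded by Pre_, where we default to "")
def morseWordA (word : String) : String :=
  word.toList.foldl
    (fun morse_string c => morse_string ++ ((PySem.List.pyGet? morseTable ((c.toNat : Int) - 97)).getD ""))
    ""

def uniqueMorseRepresentations (words : List String) : Int :=
  let transformations : PySem.Set String :=
    words.foldl (fun s word => PySem.Set.add s (morseWordA word)) PySem.Set.empty
  (transformations.length : Int)

-- ===== PORT B =====
-- "".join(morse_alphabet[ord(c) - 97] for c in word)
def morseWordB (word : String) : String :=
  String.join (word.toList.map (fun c => (PySem.List.pyGet? morseTable ((c.toNat : Int) - 97)).getD ""))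

-- walk the sorted list, counting entries different from their predecessor
def countNewB (prev : Option String) : List String → Int
  | [] => 0
  | t :: rest => if some t = prev then countNewB prev rest else 1 + countNewB (some t) rest

def uniqueMorseRepresentations_alt (words : List String) : Int :=
  let transforms := PySem.List.sorted (words.map morseWordB) (fun t => t) false
  countNewB none transforms

-- ===== PRECONDITION & SPEC =====
-- A raises IndexError whenever some character c has ord(c) - 97 outside Python's
-- valid index range [-26, 25] for the 26-entry table, i.e. ord(c) ∉ [71, 122];
-- Pre_ admits exactly the inputs on which A returns.
def Pre_uniqueMorseRepresentations (words : List String) : Prop :=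
  (words.all (fun w => w.toList.all (fun c => 71 ≤ c.toNat && c.toNat ≤ 122))) = true
instance (words : List String) : Decidable (Pre_uniqueMorseRepresentations words) := by
  unfold Pre_uniqueMorseRepresentations; infer_instance

def pvWitness_uniqueMorseRepresentations : List String := ["gin", "zen", "gig", "msg"]

def Spec_uniqueMorseRepresentations (words : List String) (out : Int) : Prop := out = uniqueMorseRepresentations_alt words
instance (words : List String) (out : Int) : Decidable (Spec_uniqueMorseRepresentations words out) := by unfold Spec_uniqueMorseRepresentations; infer_instance

-- ===== CLAIM (what is proved, stated in full; the proofs are below) =====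
def Claim_equal_uniqueMorseRepresentations : Prop := ∀ (words : List String), Dom_uniqueMorseRepresentations words → Pre_uniqueMorseRepresentations words → Spec_uniqueMorseRepresentations words (uniqueMorseRepresentations words)

-- ===== LEMMAS AND PROOFS =====

-- A's character loop and B's join build the same string.
theorem foldl_str_append (u : List String) (a : String) :
    u.foldl (· ++ ·) a = a ++ u.foldl (· ++ ·) "" := by
  induction u generalizing a with
  | nil => simp
  | cons s t ih =>
      simp only [List.foldl_cons, String.empty_append]
      rw [ih (a ++ s), ih s, String.append_assoc]

theorem foldl_append_eq_join (f : Char → String) (l : List Char) (acc : String) :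
    l.foldl (fun a c => a ++ f c) acc = acc ++ String.join (l.map f) := by
  induction l generalizing acc with
  | nil => simp [String.join]
  | cons c t ih =>
      simp only [List.foldl_cons, List.map_cons, ih]
      rw [String.join, String.join, List.foldl_cons, String.empty_append,
          foldl_str_append (t.map f) (f c), String.append_assoc]

theorem morseWord_eq (word : String) : morseWordA word = morseWordB word := by
  unfold morseWordA morseWordB
  rw [foldl_append_eq_join, String.empty_append]

-- auxiliary order on an optional lower bound
def prevFinset : Option String → Finset String
  | none => ∅
  | some p => {p}

-- core counting lemma: on a (≤)-sorted list whose elements all dominate `prev`,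
-- countNewB counts exactly the distinct elements not equal to prev.
theorem countNewB_sorted (l : List String) (hs : l.Pairwise (· ≤ ·)) :
    ∀ prev : Option String, (∀ p, prev = some p → ∀ y ∈ l, p ≤ y) →
      countNewB prev l = ((l.toFinset \ prevFinset prev).card : Int) := by
  induction l with
  | nil => intro prev _; simp [countNewB]
  | cons x xs ih =>
      intro prev hlb
      have hx : ∀ y ∈ xs, x ≤ y := (List.pairwise_cons.mp hs).1
      have hxs : xs.Pairwise (· ≤ ·) := (List.pairwise_cons.mp hs).2
      have hIH := ih hxs (some x) (fun p hp y hy => (Option.some.inj hp) ▸ hx y hy)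
      by_cases hcase : some x = prev
      · subst hcase
        have hfs : (x :: xs).toFinset \ prevFinset (some x) = xs.toFinset \ prevFinset (some x) := by
          simp only [List.toFinset_cons, prevFinset]
          rw [Finset.insert_sdiff_of_mem _ (Finset.mem_singleton_self x)]
        rw [show countNewB (some x) (x :: xs) = countNewB (some x) xs from by simp [countNewB],
            hIH, hfs]
      · simp only [countNewB, if_neg hcase, hIH]
        have hsd : (x :: xs).toFinset \ prevFinset prev = insert x xs.toFinset := by
          cases prev with
          | none => simp [prevFinset]
          | some p =>
              have hpx : p ≤ x := hlb p rfl x (List.mem_cons_self)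
              have hpne : p ≠ x := fun h => hcase (by rw [h])
              have hplt : p < x := lt_of_le_of_ne hpx hpne
              have hpnot : p ∉ insert x xs.toFinset := by
                simp only [Finset.mem_insert, List.mem_toFinset]
                rintro (rfl | hmem)
                · exact hpne rfl
                · exact absurd (hx p hmem) (not_le.mpr hplt)
              simp only [List.toFinset_cons, prevFinset]
              rw [Finset.sdiff_singleton_eq_erase, Finset.erase_eq_of_notMem hpnot]
        rw [hsd]
        have hcard : (insert x xs.toFinset).card = (xs.toFinset.erase x).card + 1 := by
          rw [← Finset.insert_erase (Finset.mem_insert_self x xs.toFinset),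
              Finset.erase_insert_eq_erase,
              Finset.card_insert_of_notMem (Finset.notMem_erase x xs.toFinset)]
        have hrew : xs.toFinset \ prevFinset (some x) = xs.toFinset.erase x := by
          simp [prevFinset, Finset.sdiff_singleton_eq_erase]
        rw [hrew, hcard]
        push_cast
        ring

-- distinct-count of any list: both sides equal toFinset.card
theorem distinct_count (ts : List String) :
    ((PySem.Set.ofList ts).length : Int) = countNewB none (PySem.List.sorted ts (fun t => t) false) := by
  have hnd := PySem.Set.nodup_ofList (xs := ts)
  have hmemo : (PySem.Set.ofList ts).toFinset = ts.toFinset := by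
    ext y; simp [PySem.Set.mem_ofList]
  have hleft : (PySem.Set.ofList ts).length = ts.toFinset.card := by
    rw [← hmemo, List.toFinset_card_of_nodup hnd]
  have hsorted := PySem.List.sorted_pairwise (xs := ts) (key := fun t => t)
  have hmem : (PySem.List.sorted ts (fun t => t) false).toFinset = ts.toFinset := by
    ext y; simp [PySem.List.mem_sorted]
  rw [countNewB_sorted _ hsorted none (by rintro p ⟨⟩), hleft]
  simp [prevFinset, hmem]

-- A's set loop is set(map(morse, words))
theorem setA_eq (words : List String) :
    words.foldl (fun s word => PySem.Set.add s (morseWordA word)) PySem.Set.empty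
      = PySem.Set.ofList (words.map morseWordA) := by
  rw [← PySem.Set.update_map_eq_foldl_add]
  exact PySem.Set.update_nil_left _

-- ===== VERDICT (by name: the statement is the Claim_ definition above) =====
theorem uniqueMorseRepresentations_spec : Claim_equal_uniqueMorseRepresentations := by
  intro words _ _
  unfold Spec_uniqueMorseRepresentations uniqueMorseRepresentations uniqueMorseRepresentations_alt
  simp only [setA_eq]
  have hmaps : words.map morseWordA = words.map morseWordB :=
    List.map_congr_left (fun w _ => morseWord_eq w)
  rw [hmaps, distinct_count]
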